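-- pv_equiv track=rewrite | github.com/pokemonlover1234/StevensHomework | CS541/HW1/findFirstWord_modified.py | findAlphabeticallyFirstWord
-- ===== SOURCE A (Python) =====
-- def findAlphabeticallyFirstWord(string):
--     if " " in string:
--         sep = " "
--     else:
--         sep = ","
--     words = [word.lower() for word in string.split(sep) if not (word == "" or word == " ")]
--     res = words[0]
--     for word in words[1:]:
--         n = 0
--         while(True):
--             # If new word is equal to current result up to
--             # its own length, then it is alphabetically break the result
--             # I.e. Apple coming before Applesauce
--             if n >= len(word):
--                 res = word
--                 break
--             # In the same vein, if the current result is equal to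
--             # the new word, but is shorter than the new word, then
--             # res is kept
--             if n >= len(res):
--                 break
--             # If the current letter is before the letter in res
--             # then the current considered word comes before res and
--             # should be the new res
--             if ord(word[n]) < ord(res[n]):
--                 res = word
--                 break
--             # If the current letter comes after the same letter in res
--             # then the current cannot can never be alphabetically before res
--             if ord(word[n]) > ord(res[n]):
--                 break
--             # If the current letter is the same, consider the next letter
--             if ord(word[n]) == ord(res[n]):
--                 n += 1
--     return res
-- ===== SOURCE B (Python) =====
-- def findAlphabeticallyFirstWord(string):
--     sep = " " if " " in string else ","
--     words = [word.lower() for word in string.split(sep) if not (word == "" or word == " ")]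
--     return sorted(words)[0]
-- ===== Notes on version B (the rewrite author's own statement) =====
-- stated objective: simpler
-- what changed: The outer-loop-with-inner-character-while min-scan is replaced by sorting the word list and returning its first element (sort-then-index instead of a hand-rolled linear min with manual character comparison).
import Mathlib
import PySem

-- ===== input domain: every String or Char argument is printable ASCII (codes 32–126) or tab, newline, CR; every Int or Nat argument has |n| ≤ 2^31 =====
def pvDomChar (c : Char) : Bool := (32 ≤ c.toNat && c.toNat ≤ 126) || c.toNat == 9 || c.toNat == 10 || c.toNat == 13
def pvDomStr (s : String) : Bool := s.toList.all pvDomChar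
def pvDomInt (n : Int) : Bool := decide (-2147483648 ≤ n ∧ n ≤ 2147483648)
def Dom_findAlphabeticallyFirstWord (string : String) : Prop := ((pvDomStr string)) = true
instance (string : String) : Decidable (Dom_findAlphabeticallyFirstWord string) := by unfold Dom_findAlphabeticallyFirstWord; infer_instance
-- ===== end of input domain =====

-- B replaces A's outer-loop-plus-inner-while min-scan by sorting the word list and taking its first element (simpler).

-- ===== PORT A =====
-- A's inner 'while True' over index n, comparing word[n] against res[n]; returns the new res.
def pvAWhile (word res : List Char) (n : Nat) : List Char :=
  if _h1 : n ≥ word.length then word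
  else if n ≥ res.length then res
  else if (word.getD n ' ').toNat < (res.getD n ' ').toNat then word
  else if (word.getD n ' ').toNat > (res.getD n ' ').toNat then res
  else pvAWhile word res (n+1)
termination_by word.length - n
decreasing_by omega

def findAlphabeticallyFirstWord (string : String) : String :=
  let sep : List Char := if PySem.Str.isIn " " string then [' '] else [',']
  let words := ((PySem.Chars.splitOn string.toList sep).filter
      (fun w => !(w == ([] : List Char) || w == [' ']))).map PySem.Chars.lower
  let res := words.headD []
  String.ofList ((words.drop 1).foldl (fun res word => pvAWhile word res 0) res)

-- ===== PORT B =====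
def findAlphabeticallyFirstWord_alt (string : String) : String :=
  let sep : List Char := if PySem.Str.isIn " " string then [' '] else [',']
  let words := ((PySem.Chars.splitOn string.toList sep).filter
      (fun w => !(w == ([] : List Char) || w == [' ']))).map PySem.Chars.lower
  String.ofList ((PySem.List.sorted words (fun w => w) false).headD [])

-- ===== PRECONDITION & SPEC =====
-- Pre_ excludes exactly the inputs whose word list is empty: there both Pythons raise IndexError
-- (A at words[0], B at sorted(words)[0]).
def Pre_findAlphabeticallyFirstWord (string : String) : Prop :=
  ((PySem.Chars.splitOn string.toList (if PySem.Str.isIn " " string then [' '] else [','])).filter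
      (fun w => !(w == ([] : List Char) || w == [' ']))) ≠ []
instance (string : String) : Decidable (Pre_findAlphabeticallyFirstWord string) := by
  unfold Pre_findAlphabeticallyFirstWord; infer_instance

def pvWitness_findAlphabeticallyFirstWord : String := "Banana apple Cherry"

def Spec_findAlphabeticallyFirstWord (string : String) (out : String) : Prop := out = findAlphabeticallyFirstWord_alt string
instance (string : String) (out : String) : Decidable (Spec_findAlphabeticallyFirstWord string out) := by unfold Spec_findAlphabeticallyFirstWord; infer_instance

-- ===== CLAIM (what is proved, stated in full; the proofs are below) =====
def Claim_equal_findAlphabeticallyFirstWord : Prop := ∀ (string : String), Dom_findAlphabeticallyFirstWord string → Pre_findAlphabeticallyFirstWord string → Spec_findAlphabeticallyFirstWord string (findAlphabeticallyFirstWord string)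

-- ===== LEMMAS AND PROOFS =====

theorem pv_nil_le (l : List Char) : ([] : List Char) ≤ l := by
  cases l with
  | nil => exact le_refl _
  | cons a t => exact le_of_lt (List.nil_lt_cons a t)

theorem pv_not_cons_le_nil (a : Char) (t : List Char) : ¬ (a :: t ≤ ([] : List Char)) := by
  intro h
  rcases le_iff_lt_or_eq.mp h with h | h
  · exact List.not_lt_nil _ h
  · exact List.cons_ne_nil a t h

theorem pv_cons_le_cons (a : Char) (t t' : List Char) : a :: t ≤ a :: t' ↔ t ≤ t' := by
  constructor
  · intro h
    rcases le_iff_lt_or_eq.mp h with h | h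
    · rcases List.cons_lt_cons_iff.mp h with h | ⟨_, h⟩
      · exact absurd h (lt_irrefl a)
      · exact le_of_lt h
    · exact le_of_eq (List.cons.injEq .. ▸ h).2
  · intro h
    rcases le_iff_lt_or_eq.mp h with h | h
    · exact le_of_lt (List.cons_lt_cons_iff.mpr (Or.inr ⟨rfl, h⟩))
    · exact le_of_eq (by rw [h])

-- A's inner while is 'keep word iff word.drop n ≤ res.drop n'.
theorem pvAWhile_eq (word res : List Char) (n : Nat) :
    pvAWhile word res n = if word.drop n ≤ res.drop n then word else res := by
  fun_induction pvAWhile word res n with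
  | case1 n h1 =>
    rw [List.drop_of_length_le (by omega), if_pos (pv_nil_le _)]
  | case2 n h1 h2 =>
    rw [List.drop_of_length_le (l := res) (by omega),
      List.drop_eq_getElem_cons (l := word) (by omega),
      if_neg (pv_not_cons_le_nil _ _)]
  | case3 n h1 h2 h3 =>
    rw [List.drop_eq_getElem_cons (l := word) (by omega),
      List.drop_eq_getElem_cons (l := res) (by omega)]
    rw [List.getD_eq_getElem word ' ' (by omega), List.getD_eq_getElem res ' ' (by omega)] at h3
    exact (if_pos (le_of_lt (List.cons_lt_cons_iff.mpr
      (Or.inl (show word[n]'(by omega) < res[n]'(by omega) from h3))))).symm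
  | case4 n h1 h2 h3 h4 =>
    rw [List.drop_eq_getElem_cons (l := word) (by omega),
      List.drop_eq_getElem_cons (l := res) (by omega)]
    rw [List.getD_eq_getElem word ' ' (by omega), List.getD_eq_getElem res ' ' (by omega)] at h4
    refine (if_neg ?_).symm
    intro h
    rcases le_iff_lt_or_eq.mp h with h | h
    · rcases List.cons_lt_cons_iff.mp h with h | ⟨h, _⟩
      · exact absurd h4 (asymm h)
      · exact absurd (h ▸ h4) (lt_irrefl _)
    · exact absurd ((List.cons.injEq .. ▸ h).1 ▸ h4) (lt_irrefl _)
  | case5 n h1 h2 h3 h4 ih =>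
    rw [List.getD_eq_getElem word ' ' (by omega), List.getD_eq_getElem res ' ' (by omega)] at h3 h4
    have he : word[n]'(by omega) = res[n]'(by omega) := by
      have hle : ¬ word[n]'(by omega) < res[n]'(by omega) := h3
      have hge : ¬ res[n]'(by omega) < word[n]'(by omega) := h4
      exact le_antisymm (le_of_not_gt hge) (le_of_not_gt hle)
    rw [ih, List.drop_eq_getElem_cons (l := word) (i := n) (by omega),
      List.drop_eq_getElem_cons (l := res) (i := n) (by omega), he]
    simp only [pv_cons_le_cons]

theorem pvAWhile_min (word res : List Char) : pvAWhile word res 0 = min word res := by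
  rw [pvAWhile_eq, min_def]
  simp only [List.drop_zero]
  split_ifs with h1
  · rfl
  · rfl

-- PySem.List.sorted is independent of which (defeq) order instances elaboration picked
theorem pv_sorted_cast (xs : List (List Char)) :
    PySem.List.sorted xs (fun w : List Char => w) false =
      @PySem.List.sorted (List Char) (List Char) List.instLinearOrder.toLT
        (@LinearOrder.toDecidableLT _ List.instLinearOrder) xs (fun w => w) false := by
  congr 1

-- the running min equals the head of the sorted list
theorem pv_foldl_min_eq_sorted_head (x : List Char) (t : List (List Char)) :
    t.foldl min x = (PySem.List.sorted (x :: t) (fun w => w) false).headD [] := by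
  rw [pv_sorted_cast]
  obtain ⟨m, s, hs⟩ : ∃ m s,
      @PySem.List.sorted (List Char) (List Char) List.instLinearOrder.toLT
        (@LinearOrder.toDecidableLT _ List.instLinearOrder) (x :: t) (fun w => w) false = m :: s := by
    cases hser : @PySem.List.sorted (List Char) (List Char) List.instLinearOrder.toLT
        (@LinearOrder.toDecidableLT _ List.instLinearOrder) (x :: t) (fun w => w) false with
    | nil => exact absurd ((@PySem.List.sorted_eq_nil_iff (List Char) (List Char) List.instLinearOrder.toLT (@LinearOrder.toDecidableLT _ List.instLinearOrder) _ _ _).mp hser) (List.cons_ne_nil x t)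
    | cons m s => exact ⟨m, s, rfl⟩
  rw [hs]
  have hmmem : m ∈ x :: t := by
    have hm : m ∈ @PySem.List.sorted (List Char) (List Char) List.instLinearOrder.toLT
        (@LinearOrder.toDecidableLT _ List.instLinearOrder) (x :: t) (fun w => w) false := by
      rw [hs]; exact List.mem_cons_self
    exact (@PySem.List.mem_sorted (List Char) (List Char) List.instLinearOrder.toLT (@LinearOrder.toDecidableLT _ List.instLinearOrder) _ _ _ _).mp hm
  have hmle : ∀ y ∈ x :: t, m ≤ y := by
    have h := PySem.List.key_head_sorted_le (x :: t) (fun w : List Char => w)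
      (m := m) (t := s) hs
    simpa using h
  have hf := PySem.List.foldl_min_le t x
  have hfm : t.foldl min x ∈ x :: t := by
    rcases PySem.List.foldl_min_mem t x with h | h
    · rw [h]; exact List.mem_cons_self
    · exact List.mem_cons_of_mem _ h
  refine le_antisymm ?_ (hmle _ hfm)
  rcases List.mem_cons.mp hmmem with h | h
  · exact h ▸ hf.1
  · exact hf.2 m h

-- core equality on a nonempty word list
theorem pv_core (ws : List (List Char)) (h : ws ≠ []) :
    (ws.drop 1).foldl (fun res word => pvAWhile word res 0) (ws.headD []) =
      (PySem.List.sorted ws (fun w => w) false).headD [] := by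
  cases ws with
  | nil => exact absurd rfl h
  | cons x t =>
    simp only [List.drop_succ_cons, List.drop_zero, List.headD_cons]
    rw [← pv_foldl_min_eq_sorted_head]
    exact PySem.List.foldl_congr_mem t (fun res word => pvAWhile word res 0) (fun a b => min a b) x
      (fun acc w _ => (pvAWhile_min w acc).trans (min_comm w acc))

-- ===== VERDICT (by name: the statement is the Claim_ definition above) =====
theorem findAlphabeticallyFirstWord_spec : Claim_equal_findAlphabeticallyFirstWord := by
  intro s _ hpre
  unfold Spec_findAlphabeticallyFirstWord
  simp only [findAlphabeticallyFirstWord, findAlphabeticallyFirstWord_alt]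
  unfold Pre_findAlphabeticallyFirstWord at hpre
  congr 1
  exact pv_core _ (fun hmap => hpre (List.map_eq_nil_iff.mp hmap))
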